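-- pv_equiv track=rewrite | github.com/kayats111/NLPatient | Server/Predictors/API.py | validateRequestSchema
-- ===== SOURCE A (Python) =====
-- from typing import List, Set
--
-- def validateRequestSchema(request: dict, schema: Set[str]) -> bool:
--     for field in schema:
--         if field not in request:
--             return False
--
--     for key in request:
--         if key not in schema:
--             return False
--
--     return True
-- ===== SOURCE B (Python) =====
-- def validateRequestSchema(request: dict, schema) -> bool:
--     # Canonicalize both sides to a sorted list of distinct keys and compare.
--     return sorted(set(request)) == sorted(set(schema))
-- ===== Notes on version B (the rewrite author's own statement) =====
-- stated objective: alternative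
-- what changed: Replaced A's two directional containment loops by canonicalization: sort the distinct keys of each side and compare the two sorted lists for equality.
import Mathlib
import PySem

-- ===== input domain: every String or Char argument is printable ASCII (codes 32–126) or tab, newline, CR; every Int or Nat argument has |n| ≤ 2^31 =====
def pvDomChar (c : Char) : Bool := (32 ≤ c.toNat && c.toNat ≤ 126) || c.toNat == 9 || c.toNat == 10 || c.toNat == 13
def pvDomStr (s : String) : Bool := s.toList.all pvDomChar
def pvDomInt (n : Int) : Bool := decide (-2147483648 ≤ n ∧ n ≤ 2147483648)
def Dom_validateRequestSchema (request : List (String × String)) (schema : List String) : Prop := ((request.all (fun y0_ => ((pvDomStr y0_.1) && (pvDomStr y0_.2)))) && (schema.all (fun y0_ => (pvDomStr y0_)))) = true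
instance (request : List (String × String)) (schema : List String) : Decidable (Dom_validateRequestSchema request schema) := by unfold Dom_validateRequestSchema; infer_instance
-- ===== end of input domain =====

-- B replaces A's two directional containment loops by canonicalization: sort the distinct keys of each side and compare the sorted lists (alternative algorithm, similar cost).


-- ===== PORT A =====
-- Loop 1: 'for field in schema: if field not in request: return False' (dict membership = key membership);
-- Loop 2: 'for key in request: if key not in schema: return False'; then 'return True'.
def validateRequestSchema (request : List (String × String)) (schema : List String) : Bool :=
  (schema.all (fun field => (request.map Prod.fst).contains field)) &&
  ((request.map Prod.fst).all (fun key => schema.contains key))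

-- ===== PORT B =====
-- 'sorted(set(request)) == sorted(set(schema))': canonical sorted distinct-key lists compared for equality.
def validateRequestSchema_alt (request : List (String × String)) (schema : List String) : Bool :=
  PySem.List.sorted (PySem.Set.ofList (request.map Prod.fst)) (fun x => x) false
    == PySem.List.sorted (PySem.Set.ofList schema) (fun x => x) false

-- ===== PRECONDITION & SPEC =====
def Spec_validateRequestSchema (request : List (String × String)) (schema : List String) (out : Bool) : Prop := out = validateRequestSchema_alt request schema
instance (request : List (String × String)) (schema : List String) (out : Bool) : Decidable (Spec_validateRequestSchema request schema out) := by unfold Spec_validateRequestSchema; infer_instance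

-- ===== CLAIM (what is proved, stated in full; the proofs are below) =====
def Claim_equal_validateRequestSchema : Prop := ∀ (request : List (String × String)) (schema : List String), Dom_validateRequestSchema request schema → Spec_validateRequestSchema request schema (validateRequestSchema request schema)

-- ===== LEMMAS AND PROOFS =====

-- ===== VERDICT (by name: the statement is the Claim_ definition above) =====
theorem validateRequestSchema_spec : Claim_equal_validateRequestSchema := by
  intro request schema _
  unfold Spec_validateRequestSchema validateRequestSchema validateRequestSchema_alt
  rw [Bool.eq_iff_iff]
  simp only [Bool.and_eq_true, List.all_eq_true, List.contains_eq_mem, decide_eq_true_eq,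
    beq_iff_eq, PySem.List.sorted_id_eq_sorted_id_iff_perm,
    List.perm_ext_iff_of_nodup (PySem.Set.nodup_ofList _) (PySem.Set.nodup_ofList _),
    PySem.Set.mem_ofList]
  constructor
  · rintro ⟨h1, h2⟩ a; exact ⟨fun ha => h2 a ha, fun ha => h1 a ha⟩
  · intro h; exact ⟨fun f hf => (h f).2 hf, fun k hk => (h k).1 hk⟩
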